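-- pv_equiv track=rewrite | github.com/NiLaScience/NLM | ancients/clean_gutenberg_texts.py | remove_public_domain_dedication_blocks
-- ===== SOURCE A (Python) =====
-- def remove_public_domain_dedication_blocks(text: str) -> str:
--     # Line-based removal: if a line contains 'public domain' and ('dedicate' or 'work of authorship' or 'cc0'),
--     # drop that line and continue dropping until a blank line.
--     lines = text.splitlines()
--     out_lines = []
--     skipping = False
--     for line in lines:
--         l = line.lower()
--         if not skipping and (
--             ("public domain" in l and ("dedicat" in l or "work of authorship" in l))
--             or "cc0" in l
--             or "creativecommons" in l
--         ):
--             skipping = True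
--             continue
--         if skipping:
--             if not line.strip():
--                 skipping = False
--             continue
--         out_lines.append(line)
--     return "\n".join(out_lines)
-- ===== SOURCE B (Python) =====
-- def remove_public_domain_dedication_blocks(text: str) -> str:
--     # Two-stage paragraph algorithm: first compute the positions of all blank
--     # lines (block separators), then process each blank-terminated paragraph
--     # independently, truncating it at its first trigger line (and dropping the
--     # paragraph's terminating blank iff it was truncated).
--     def trigger(line):
--         l = line.lower()
--         return (
--             ("public domain" in l and ("dedicat" in l or "work of authorship" in l))
--             or "cc0" in l
--             or "creativecommons" in l
--         )
--
--     lines = text.splitlines()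
--     n = len(lines)
--     blanks = [i for i, l in enumerate(lines) if not l.strip()]
--     out = []
--     start = 0
--     for b in blanks + [n]:
--         para = lines[start:b]
--         hit = next((j for j, l in enumerate(para) if trigger(l)), None)
--         if hit is None:
--             out.extend(para)
--             if b < n:
--                 out.append(lines[b])
--         else:
--             out.extend(para[:hit])
--         start = b + 1
--     return "\n".join(out)
-- ===== Notes on version B (the rewrite author's own statement) =====
-- stated objective: alternative
-- what changed: Replaces A's single-pass skip-flag state machine by a two-stage paragraph algorithm: first compute the list of blank-line positions, then process each blank-terminated paragraph independently, truncating it at its first trigger line (and dropping its terminating blank iff truncated).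
import Mathlib
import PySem

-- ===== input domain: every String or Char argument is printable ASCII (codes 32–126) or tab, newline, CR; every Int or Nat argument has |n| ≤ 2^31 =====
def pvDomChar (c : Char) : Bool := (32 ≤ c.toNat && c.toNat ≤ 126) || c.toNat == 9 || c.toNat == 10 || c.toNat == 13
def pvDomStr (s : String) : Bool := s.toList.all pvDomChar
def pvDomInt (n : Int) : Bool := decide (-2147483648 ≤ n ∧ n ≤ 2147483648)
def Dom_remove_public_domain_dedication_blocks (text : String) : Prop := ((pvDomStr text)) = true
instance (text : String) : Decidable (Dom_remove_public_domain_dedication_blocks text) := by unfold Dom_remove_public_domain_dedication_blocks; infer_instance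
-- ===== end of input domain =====

-- B replaces A's one-pass skip-flag state machine by a two-stage paragraph algorithm:
-- it first lists the positions of all blank lines, then truncates each
-- blank-terminated paragraph independently at its first trigger line (objective: alternative).

-- ===== PORT A =====
-- A's for-loop over the lines, carrying the `skipping` flag
def pvAGo (skipping : Bool) : List String → List String
  | [] => []
  | line :: rest =>
    let l := PySem.Str.lower line
    if !skipping
        && ((PySem.Str.isIn "public domain" l
              && (PySem.Str.isIn "dedicat" l || PySem.Str.isIn "work of authorship" l))
            || PySem.Str.isIn "cc0" l
            || PySem.Str.isIn "creativecommons" l) then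
      pvAGo true rest
    else if skipping then
      if PySem.Str.strip line == "" then pvAGo false rest else pvAGo skipping rest
    else
      line :: pvAGo skipping rest

def remove_public_domain_dedication_blocks (text : String) : String :=
  PySem.Str.join "\n" (pvAGo false (PySem.Str.splitlines text))

-- ===== PORT B =====
-- B's helper `trigger(line)`
def pvTrigger (line : String) : Bool :=
  let l := PySem.Str.lower line
  (PySem.Str.isIn "public domain" l
      && (PySem.Str.isIn "dedicat" l || PySem.Str.isIn "work of authorship" l))
    || PySem.Str.isIn "cc0" l || PySem.Str.isIn "creativecommons" l

-- one iteration of B's `for b in blanks + [n]` loop body over the state (out, start)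
def pvStep (lines : List String) : List String × Int → Int → List String × Int
  | (out, start), b =>
    match (PySem.List.slice lines (some start) (some b)).findIdx? pvTrigger with
    | none =>
        (out ++ PySem.List.slice lines (some start) (some b)
          ++ (if b < (lines.length : Int) then [PySem.List.pyGetD lines b ""] else []), b + 1)
    | some j => (out ++ (PySem.List.slice lines (some start) (some b)).take j, b + 1)

def remove_public_domain_dedication_blocks_alt (text : String) : String :=
  let lines := PySem.Str.splitlines text
  let n : Int := lines.length
  let blanks := ((PySem.List.enumerate lines).filter
      (fun p => PySem.Str.strip p.2 == "")).map Prod.fst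
  PySem.Str.join "\n" (((blanks ++ [n]).foldl (pvStep lines) ([], 0)).1)

-- ===== PRECONDITION & SPEC =====
def Spec_remove_public_domain_dedication_blocks (text : String) (out : String) : Prop := out = remove_public_domain_dedication_blocks_alt text
instance (text : String) (out : String) : Decidable (Spec_remove_public_domain_dedication_blocks text out) := by unfold Spec_remove_public_domain_dedication_blocks; infer_instance

-- ===== CLAIM (what is proved, stated in full; the proofs are below) =====
def Claim_equal_remove_public_domain_dedication_blocks : Prop := ∀ (text : String), Dom_remove_public_domain_dedication_blocks text → Spec_remove_public_domain_dedication_blocks text (remove_public_domain_dedication_blocks text)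

-- ===== LEMMAS AND PROOFS =====

-- the blank-line positions, as a recursive specification (proof-only helper)
def pvSpecB : List String → Int → List Int
  | [], _ => []
  | l :: t, s => if PySem.Str.strip l == "" then s :: pvSpecB t (s + 1) else pvSpecB t (s + 1)

theorem pvBlanks_eq_specB (ls : List String) (s : Int) :
    ((PySem.List.enumerate ls s).filter (fun p => PySem.Str.strip p.2 == "")).map Prod.fst
      = pvSpecB ls s := by
  induction ls generalizing s with
  | nil => simp [PySem.List.enumerate_nil, pvSpecB]
  | cons l t ih =>
    rw [PySem.List.enumerate_cons, List.filter_cons]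
    by_cases hb : PySem.Str.strip l == ""
    · simp [hb, pvSpecB, ih]
    · simp [hb, pvSpecB, ih]

theorem pvSpecB_append_nonblank (para rest : List String) (s : Int)
    (h : ∀ l ∈ para, ¬(PySem.Str.strip l == "")) :
    pvSpecB (para ++ rest) s = pvSpecB rest (s + para.length) := by
  induction para generalizing s with
  | nil => simp
  | cons l t ih =>
    have hl : ¬(PySem.Str.strip l == "") := h l (by simp)
    rw [List.cons_append, pvSpecB, if_neg hl, ih _ (fun x hx => h x (by simp [hx]))]
    congr 1
    simp only [List.length_cons]
    push_cast
    ring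

-- a whitespace-only line never satisfies the trigger condition
set_option maxRecDepth 4096 in
theorem pvBlank_not_trigger (line : String) (h : (PySem.Str.strip line == "") = true) :
    pvTrigger line = false := by
  have hstrip : PySem.Chars.strip line.toList = [] := by
    have h' : PySem.Str.strip line = "" := by
      exact (beq_iff_eq).1 h
    have := congrArg String.toList h'
    simpa [PySem.Str.strip] using this
  have hall : ∀ a ∈ line.toList, PySem.Chars.isspace a = true := by
    intro a ha
    unfold PySem.Chars.strip PySem.Chars.rstrip PySem.Chars.lstrip at hstrip
    have h1 : List.dropWhile PySem.Chars.isspace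
        ((List.dropWhile PySem.Chars.isspace line.toList).reverse) = [] := by
      rcases List.eq_nil_or_concat' (List.dropWhile PySem.Chars.isspace ((List.dropWhile PySem.Chars.isspace line.toList).reverse)) with h2 | ⟨ys, y, h2⟩
      · exact h2
      · rw [h2] at hstrip; simp at hstrip
    have h2 := (List.dropWhile_eq_nil_iff).1 h1
    by_cases hmem : a ∈ List.takeWhile PySem.Chars.isspace line.toList
    · exact List.mem_takeWhile_imp hmem
    · have : a ∈ List.takeWhile PySem.Chars.isspace line.toList
          ∨ a ∈ List.dropWhile PySem.Chars.isspace line.toList := by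
        have := List.takeWhile_append_dropWhile (p := PySem.Chars.isspace) (l := line.toList)
        rw [← this] at ha
        exact List.mem_append.1 ha
      rcases this with h3 | h3
      · exact List.mem_takeWhile_imp h3
      · exact h2 a (by simpa using h3)
  -- lower of an all-whitespace string is all-whitespace
  have hlow : ∀ c ∈ PySem.Chars.lower line.toList, PySem.Chars.isspace c = true := by
    intro c hc
    unfold PySem.Chars.lower at hc
    obtain ⟨a, ha, rfl⟩ := List.mem_map.1 hc
    have hs := hall a ha
    have hnu : PySem.Chars.isupper a = false := by
      revert hs
      unfold PySem.Chars.isspace PySem.Chars.isupper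
      by_cases h : ('A' ≤ a ∧ a ≤ 'Z')
      · have h1 : 65 ≤ a.toNat := h.1
        have h2 : a.toNat ≤ 90 := h.2
        intro hs
        exfalso
        simp only [Bool.or_eq_true, Bool.and_eq_true, decide_eq_true_eq] at hs
        omega
      · intro _
        simp only [Bool.and_eq_false_iff, decide_eq_false_iff_not]
        by_cases h1 : 'A' ≤ a
        · exact Or.inr (fun h2 => h ⟨h1, h2⟩)
        · exact Or.inl h1
    rw [PySem.Chars.lowerChar, hnu]
    · simpa using hs
  have key : ∀ sub : List Char, sub ≠ [] →
      PySem.Chars.isspace (sub.headD ' ') = false →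
      PySem.Chars.isIn sub (PySem.Chars.lower line.toList) = false := by
    intro sub hne hhead
    by_contra hcontra
    have ht : PySem.Chars.isIn sub (PySem.Chars.lower line.toList) = true := by
      cases hval : PySem.Chars.isIn sub (PySem.Chars.lower line.toList)
      · exact absurd hval hcontra
      · rfl
    have hinf := (PySem.Chars.isIn_iff_infix _ _).1 ht
    obtain ⟨c, cs, hcs⟩ := List.exists_cons_of_ne_nil hne
    have hcmem : c ∈ PySem.Chars.lower line.toList := hinf.subset (by simp [hcs])
    have h7 := hlow c hcmem
    rw [hcs] at hhead
    simp only [List.headD_cons] at hhead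
    rw [h7] at hhead
    exact absurd hhead (by decide)
  have kpd := key ['p','u','b','l','i','c',' ','d','o','m','a','i','n'] (by simp) (by decide)
  have kcc := key ['c','c','0'] (by simp) (by decide)
  have kcr := key ['c','r','e','a','t','i','v','e','c','o','m','m','o','n','s'] (by simp) (by decide)
  simp [pvTrigger, kpd, kcc, kcr]

-- pvAGo in terms of pvTrigger
theorem pvAGo_false_cons (line : String) (rest : List String) :
    pvAGo false (line :: rest)
      = if pvTrigger line then pvAGo true rest else line :: pvAGo false rest := rfl

theorem pvAGo_true_cons (line : String) (rest : List String) :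
    pvAGo true (line :: rest)
      = if PySem.Str.strip line == "" then pvAGo false rest else pvAGo true rest := rfl

theorem pvAGo_false_append_of_none (para : List String)
    (h : para.findIdx? pvTrigger = none) (rest : List String) :
    pvAGo false (para ++ rest) = para ++ pvAGo false rest := by
  induction para with
  | nil => simp
  | cons l t ih =>
    rw [List.findIdx?_cons] at h
    by_cases hl : pvTrigger l
    · simp [hl] at h
    · simp only [hl, Bool.false_eq_true, if_false, Option.map_eq_none_iff] at h
      rw [List.cons_append, pvAGo_false_cons, if_neg (by simp [hl]), ih h, List.cons_append]

theorem pvAGo_true_append_of_nonblank (tl : List String)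
    (h : ∀ l ∈ tl, ¬(PySem.Str.strip l == "")) (rest : List String) :
    pvAGo true (tl ++ rest) = pvAGo true rest := by
  induction tl with
  | nil => simp
  | cons l t ih =>
    rw [List.cons_append, pvAGo_true_cons, if_neg (h l (by simp))]
    exact ih (fun x hx => h x (by simp [hx]))

theorem pvAGo_false_append_of_some (para : List String) (j : Nat)
    (h : para.findIdx? pvTrigger = some j)
    (hnb : ∀ l ∈ para, ¬(PySem.Str.strip l == "")) (rest : List String) :
    pvAGo false (para ++ rest) = para.take j ++ pvAGo true rest := by
  induction para generalizing j with
  | nil => simp at h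
  | cons l t ih =>
    rw [List.findIdx?_cons] at h
    by_cases hl : pvTrigger l
    · simp only [hl, if_true, Option.some.injEq] at h
      subst h
      rw [List.cons_append, pvAGo_false_cons, if_pos hl, List.take_zero, List.nil_append]
      exact pvAGo_true_append_of_nonblank t (fun x hx => hnb x (by simp [hx])) rest
    · simp only [hl, Bool.false_eq_true, if_false] at h
      obtain ⟨j', hj', rfl⟩ := Option.map_eq_some_iff.1 h
      rw [List.cons_append, pvAGo_false_cons, if_neg (by simp [hl]),
        ih j' hj' (fun x hx => hnb x (by simp [hx])), List.take_succ_cons, List.cons_append]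

-- evaluation lemmas for one step of B's fold
theorem pvStep_none (lines out : List String) (start b : Int)
    (h : (PySem.List.slice lines (some start) (some b)).findIdx? pvTrigger = none) :
    pvStep lines (out, start) b
      = (out ++ PySem.List.slice lines (some start) (some b)
          ++ (if b < (lines.length : Int) then [PySem.List.pyGetD lines b ""] else []), b + 1) := by
  simp only [pvStep]
  rw [h]

theorem pvStep_some (lines out : List String) (start b : Int) (j : Nat)
    (h : (PySem.List.slice lines (some start) (some b)).findIdx? pvTrigger = some j) :
    pvStep lines (out, start) b
      = (out ++ (PySem.List.slice lines (some start) (some b)).take j, b + 1) := by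
  simp only [pvStep]
  rw [h]

-- the main invariant: folding B's step over the blank positions of the unprocessed
-- suffix produces exactly what A's flag machine produces on that suffix
theorem pvMain : ∀ (n : Nat) (suf pre out : List String), suf.length ≤ n →
    (((pvSpecB suf (pre.length : Int) ++ [(((pre ++ suf).length : Nat) : Int)]).foldl
        (pvStep (pre ++ suf)) (out, (pre.length : Int))).1)
      = out ++ pvAGo false suf := by
  intro n
  induction n with
  | zero =>
    intro suf pre out hlen
    have hsuf : suf = [] := List.eq_nil_of_length_eq_zero (Nat.le_zero.1 hlen)
    subst hsuf
    simp only [pvSpecB, List.nil_append, List.append_nil, List.foldl_cons, List.foldl_nil]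
    have hsl : PySem.List.slice pre (some (pre.length : Int)) (some ((pre.length : Nat) : Int))
        = ([] : List String) := by
      rw [PySem.List.slice_natCast]
      simp
    rw [pvStep_none pre out _ _ (by rw [hsl]; rfl), hsl]
    simp [pvAGo]
  | succ n ih =>
    intro suf pre out hlen
    set P : String → Bool := fun l => !(PySem.Str.strip l == "") with hP
    have hdec := List.takeWhile_append_dropWhile (p := P) (l := suf)
    set para := suf.takeWhile P with hpara
    have hparanb : ∀ l ∈ para, ¬(PySem.Str.strip l == "") := by
      intro l hl
      have := List.mem_takeWhile_imp hl
      rw [hP] at this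
      simpa using this
    cases hdrop : suf.dropWhile P with
    | nil =>
      -- no blank line left: one paragraph running to the end of the input
      have hsuf : suf = para := by rw [← hdec, hdrop, List.append_nil]
      have hsufnb : ∀ l ∈ suf, ¬(PySem.Str.strip l == "") := fun l hl => hparanb l (hsuf ▸ hl)
      have hspec : pvSpecB suf (pre.length : Int) = [] := by
        conv_lhs => rw [hsuf, show para = para ++ [] by simp]
        rw [pvSpecB_append_nonblank para [] (pre.length : Int) hparanb]
        rfl
      rw [hspec, List.nil_append, List.foldl_cons, List.foldl_nil]
      have hsl : PySem.List.slice (pre ++ suf) (some (pre.length : Int))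
          (some (((pre ++ suf).length : Nat) : Int)) = suf := by
        rw [PySem.List.slice_natCast, List.drop_left]
        simp
      cases hfind : suf.findIdx? pvTrigger with
      | none =>
        rw [pvStep_none (pre ++ suf) out _ _ (by rw [hsl]; exact hfind), hsl]
        have hnlt : ¬((((pre ++ suf).length : Nat) : Int) < ((pre ++ suf).length : Int)) := by
          simp
        rw [if_neg hnlt]
        have h2 := pvAGo_false_append_of_none suf hfind []
        simp only [List.append_nil] at h2
        rw [h2]
        simp [pvAGo]
      | some j =>
        rw [pvStep_some (pre ++ suf) out _ _ j (by rw [hsl]; exact hfind), hsl]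
        have h2 := pvAGo_false_append_of_some suf j hfind hsufnb []
        simp only [List.append_nil] at h2
        rw [h2]
        simp [pvAGo]
    | cons blank rest =>
      -- a paragraph, then its terminating blank line, then the rest
      have hblank : (PySem.Str.strip blank == "") = true := by
        have h8 := List.head?_dropWhile_not P suf
        rw [hdrop] at h8
        simp only [List.head?_cons, hP] at h8
        simpa using h8
      have hsuf : suf = para ++ blank :: rest := by rw [← hdec, hdrop]
      have hspec : pvSpecB suf (pre.length : Int)
          = ((pre.length : Int) + para.length)
              :: pvSpecB rest ((pre.length : Int) + para.length + 1) := by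
        conv_lhs => rw [hsuf]
        rw [pvSpecB_append_nonblank para (blank :: rest) _ hparanb, pvSpecB, if_pos hblank]
      have hcast : (pre.length : Int) + (para.length : Int)
          = (((pre ++ para).length : Nat) : Int) := by simp
      have hlines : pre ++ suf = (pre ++ para) ++ blank :: rest := by rw [hsuf]; simp
      have hsl : PySem.List.slice (pre ++ suf) (some (pre.length : Int))
          (some ((pre.length : Int) + para.length)) = para := by
        rw [hcast, hlines]
        have h5 : (pre ++ para) ++ blank :: rest = pre ++ (para ++ blank :: rest) := by simp
        rw [h5, PySem.List.slice_natCast, List.drop_left]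
        simp
      have hlen' : rest.length ≤ n := by
        rw [hsuf] at hlen
        simp only [List.length_append, List.length_cons] at hlen
        omega
      have hstart : (pre.length : Int) + (para.length : Int) + 1
          = (((pre ++ para ++ [blank]).length : Nat) : Int) := by
        simp only [List.length_append, List.length_cons, List.length_nil]
        push_cast
        ring
      have hlines2 : pre ++ suf = (pre ++ para ++ [blank]) ++ rest := by rw [hsuf]; simp
      rw [hspec, List.cons_append, List.foldl_cons]
      cases hfind : para.findIdx? pvTrigger with
      | none =>
        rw [pvStep_none (pre ++ suf) out _ _ (by rw [hsl]; exact hfind), hsl]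
        have hblt : ((pre.length : Int) + para.length) < ((pre ++ suf).length : Int) := by
          rw [hsuf]
          simp only [List.length_append, List.length_cons]
          push_cast
          omega
        rw [if_pos hblt]
        have hget : PySem.List.pyGetD (pre ++ suf) ((pre.length : Int) + para.length) ""
            = blank := by
          rw [hcast, PySem.List.pyGetD_natCast, hlines]
          unfold List.getD
          rw [List.getElem?_append_right (Nat.le_refl _)]
          simp
        rw [hget]
        have ihres := ih rest (pre ++ para ++ [blank]) (out ++ para ++ [blank]) hlen'
        rw [← hstart, ← hlines2] at ihres
        rw [ihres]
        rw [hsuf, pvAGo_false_append_of_none para hfind (blank :: rest), pvAGo_false_cons,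
          if_neg (by simp [pvBlank_not_trigger blank hblank])]
        simp
      | some j =>
        rw [pvStep_some (pre ++ suf) out _ _ j (by rw [hsl]; exact hfind), hsl]
        have ihres := ih rest (pre ++ para ++ [blank]) (out ++ para.take j) hlen'
        rw [← hstart, ← hlines2] at ihres
        rw [ihres]
        rw [hsuf, pvAGo_false_append_of_some para j hfind hparanb (blank :: rest),
          pvAGo_true_cons, if_pos hblank]
        simp

-- ===== VERDICT (by name: the statement is the Claim_ definition above) =====
theorem remove_public_domain_dedication_blocks_spec : Claim_equal_remove_public_domain_dedication_blocks := by
  intro text _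
  unfold Spec_remove_public_domain_dedication_blocks
  unfold remove_public_domain_dedication_blocks remove_public_domain_dedication_blocks_alt
  simp only []
  congr 1
  rw [pvBlanks_eq_specB]
  have := pvMain (PySem.Str.splitlines text).length (PySem.Str.splitlines text) [] [] (Nat.le_refl _)
  simpa using this.symm
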